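-- pv_equiv track=rewrite | github.com/GoodGuyGroves/deep-researcher | engine.py | _deduplicate_and_format_sources
-- ===== SOURCE A (Python) =====
-- CHARS_PER_TOKEN = 4
--
-- def _deduplicate_and_format_sources(
--     search_response: dict,
--     max_tokens_per_source: int,
--     fetch_full_page: bool = False,
-- ) -> str:
--     """Deduplicate search results by URL and format them for the LLM."""
--     results = search_response.get("results", [])
--
--     seen_urls: set[str] = set()
--     formatted = "Sources:\n\n"
--
--     for source in results:
--         url = source.get("url", "")
--         if url in seen_urls:
--             continue
--         seen_urls.add(url)
--
--         title = source.get("title", "")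
--         snippet = source.get("content", "")
--         formatted += f"Source: {title}\n===\n"
--         formatted += f"URL: {url}\n===\n"
--         formatted += f"Most relevant content from source: {snippet}\n===\n"
--
--         if fetch_full_page:
--             char_limit = max_tokens_per_source * CHARS_PER_TOKEN
--             raw = source.get("raw_content") or ""
--             if len(raw) > char_limit:
--                 raw = raw[:char_limit] + "... [truncated]"
--             formatted += (
--                 f"Full source content limited to {max_tokens_per_source} tokens: {raw}\n\n"
--             )
--
--     return formatted.strip()
-- ===== SOURCE B (Python) =====
-- CHARS_PER_TOKEN = 4
--
--
-- def _deduplicate_and_format_sources(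
--     search_response,
--     max_tokens_per_source,
--     fetch_full_page=False,
-- ):
--     """Filter-based nub: no seen-set; repeatedly format the head source and
--     delete every later source sharing its URL from the remaining work list."""
--     blocks = []
--     rest = list(search_response.get("results", []))
--     while rest:
--         head = rest[0]
--         url = head.get("url", "")
--         text = (
--             f"Source: {head.get('title', '')}\n===\n"
--             f"URL: {url}\n===\n"
--             f"Most relevant content from source: {head.get('content', '')}\n===\n"
--         )
--         if fetch_full_page:
--             limit = max_tokens_per_source * CHARS_PER_TOKEN
--             raw = head.get("raw_content") or ""
--             if len(raw) > limit:
--                 raw = raw[:limit] + "... [truncated]"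
--             text += (
--                 f"Full source content limited to {max_tokens_per_source} tokens: {raw}\n\n"
--             )
--         blocks.append(text)
--         rest = [s for s in rest[1:] if s.get("url", "") != url]
--     return ("Sources:\n\n" + "".join(blocks)).strip()
-- ===== Notes on version B (the rewrite author's own statement) =====
-- stated objective: alternative
-- what changed: Replaces A's single pass with a seen-URL set by a filter-based nub: no set at all - the loop repeatedly formats the head of a shrinking work list and removes every later source with the same URL before continuing, collecting blocks into a list joined at the end.
import Mathlib
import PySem

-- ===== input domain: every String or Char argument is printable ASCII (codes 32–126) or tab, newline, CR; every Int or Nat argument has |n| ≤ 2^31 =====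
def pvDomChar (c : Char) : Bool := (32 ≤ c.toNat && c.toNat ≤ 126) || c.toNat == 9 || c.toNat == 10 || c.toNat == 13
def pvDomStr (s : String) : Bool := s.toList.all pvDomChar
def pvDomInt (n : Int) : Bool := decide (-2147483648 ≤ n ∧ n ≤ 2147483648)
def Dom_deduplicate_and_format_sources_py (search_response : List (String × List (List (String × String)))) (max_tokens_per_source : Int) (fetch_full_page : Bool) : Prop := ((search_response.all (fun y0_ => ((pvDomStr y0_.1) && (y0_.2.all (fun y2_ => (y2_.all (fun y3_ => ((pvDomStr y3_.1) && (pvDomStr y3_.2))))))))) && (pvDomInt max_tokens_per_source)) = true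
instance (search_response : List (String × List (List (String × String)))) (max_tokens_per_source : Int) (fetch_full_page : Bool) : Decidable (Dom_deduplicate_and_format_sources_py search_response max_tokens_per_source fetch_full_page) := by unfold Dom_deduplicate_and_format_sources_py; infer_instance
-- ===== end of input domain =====

-- B replaces A's seen-set dedup loop with a filter-based nub (format head, filter its URL out of the rest); same output, different algorithm, not faster.


-- ===== PORT A =====
-- one iteration of A's loop over `results`: state = (seen_urls, formatted)
def pvStepA (max_tokens_per_source : Int) (fetch_full_page : Bool)
    (st : PySem.Set String × String) (source : List (String × String)) :
    PySem.Set String × String :=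
  let url := PySem.Dict.getD (PySem.Dict.mk source) "url" ""
  if PySem.Set.contains st.1 url then st
  else
    let seen := PySem.Set.add st.1 url
    let title := PySem.Dict.getD (PySem.Dict.mk source) "title" ""
    let snippet := PySem.Dict.getD (PySem.Dict.mk source) "content" ""
    let formatted := st.2 ++ ("Source: " ++ title ++ "\n===\n")
    let formatted := formatted ++ ("URL: " ++ url ++ "\n===\n")
    let formatted := formatted ++ ("Most relevant content from source: " ++ snippet ++ "\n===\n")
    let formatted :=
      if fetch_full_page then
        let char_limit := max_tokens_per_source * 4
        -- `source.get("raw_content") or ""`: "" is the only falsy str, so this is getD with default ""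
        let raw0 := PySem.Dict.getD (PySem.Dict.mk source) "raw_content" ""
        let raw := if PySem.Str.len raw0 > char_limit
                   then PySem.Str.slice raw0 none (some char_limit) ++ "... [truncated]"
                   else raw0
        formatted ++ ("Full source content limited to " ++ PySem.Int.toStr max_tokens_per_source ++ " tokens: " ++ raw ++ "\n\n")
      else formatted
    (seen, formatted)

def deduplicate_and_format_sources_py (search_response : List (String × List (List (String × String)))) (max_tokens_per_source : Int) (fetch_full_page : Bool) : String :=
  let results := PySem.Dict.getD (PySem.Dict.mk search_response) "results" []
  let st := results.foldl (pvStepA max_tokens_per_source fetch_full_page) (PySem.Set.empty, "Sources:\n\n")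
  PySem.Str.strip st.2

-- ===== PORT B =====
def pvUrlOf (source : List (String × String)) : String :=
  PySem.Dict.getD (PySem.Dict.mk source) "url" ""

-- the body of Source B's loop: the formatted block for the head source
def pvBlockB (max_tokens_per_source : Int) (fetch_full_page : Bool)
    (head : List (String × String)) : String :=
  let text := "Source: " ++ PySem.Dict.getD (PySem.Dict.mk head) "title" "" ++ "\n===\n"
      ++ "URL: " ++ pvUrlOf head ++ "\n===\n"
      ++ "Most relevant content from source: " ++ PySem.Dict.getD (PySem.Dict.mk head) "content" "" ++ "\n===\n"
  if fetch_full_page then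
    let limit := max_tokens_per_source * 4
    let raw0 := PySem.Dict.getD (PySem.Dict.mk head) "raw_content" ""
    let raw := if PySem.Str.len raw0 > limit
               then PySem.Str.slice raw0 none (some limit) ++ "... [truncated]"
               else raw0
    text ++ ("Full source content limited to " ++ PySem.Int.toStr max_tokens_per_source ++ " tokens: " ++ raw ++ "\n\n")
  else text

-- Source B's while loop: block the head, filter its URL out of the tail, continue
def pvRunB (max_tokens_per_source : Int) (fetch_full_page : Bool) :
    List (List (String × String)) → List String
  | [] => []
  | head :: tail =>
    pvBlockB max_tokens_per_source fetch_full_page head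
      :: pvRunB max_tokens_per_source fetch_full_page
           (tail.filter (fun s => pvUrlOf s ≠ pvUrlOf head))
termination_by rs => rs.length
decreasing_by
  simp only [List.length_unattach, List.length_cons]
  exact Nat.lt_succ_of_le (le_trans (List.length_filter_le _ _) (le_of_eq (List.length_attach)))

def deduplicate_and_format_sources_py_alt (search_response : List (String × List (List (String × String)))) (max_tokens_per_source : Int) (fetch_full_page : Bool) : String :=
  let results := PySem.Dict.getD (PySem.Dict.mk search_response) "results" []
  PySem.Str.strip ("Sources:\n\n" ++ PySem.Str.join "" (pvRunB max_tokens_per_source fetch_full_page results))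

-- ===== PRECONDITION & SPEC =====
def Spec_deduplicate_and_format_sources_py (search_response : List (String × List (List (String × String)))) (max_tokens_per_source : Int) (fetch_full_page : Bool) (out : String) : Prop := out = deduplicate_and_format_sources_py_alt search_response max_tokens_per_source fetch_full_page
instance (search_response : List (String × List (List (String × String)))) (max_tokens_per_source : Int) (fetch_full_page : Bool) (out : String) : Decidable (Spec_deduplicate_and_format_sources_py search_response max_tokens_per_source fetch_full_page out) := by unfold Spec_deduplicate_and_format_sources_py; infer_instance

-- ===== CLAIM =====
def Claim_equal_deduplicate_and_format_sources_py : Prop := ∀ (search_response : List (String × List (List (String × String)))) (max_tokens_per_source : Int) (fetch_full_page : Bool), Dom_deduplicate_and_format_sources_py search_response max_tokens_per_source fetch_full_page → Spec_deduplicate_and_format_sources_py search_response max_tokens_per_source fetch_full_page (deduplicate_and_format_sources_py search_response max_tokens_per_source fetch_full_page)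

-- ===== LEMMAS AND PROOFS =====

theorem pv_join_nil : PySem.Str.join "" ([] : List String) = "" := rfl

theorem pv_join_cons (x : String) (l : List String) :
    PySem.Str.join "" (x :: l) = x ++ PySem.Str.join "" l := by
  apply String.toList_inj.mp
  cases l <;> simp [PySem.Str.join, PySem.Chars.join, List.intercalate]

-- A's fold, from an arbitrary seen set, equals the blocks of the sources whose URLs
-- are new, deduplicated by the filter-based nub.
theorem pv_foldA (m : Int) (f : Bool) (rs : List (List (String × String))) :
    ∀ (seen : PySem.Set String) (acc : String),
      (rs.foldl (pvStepA m f) (seen, acc)).2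
        = acc ++ PySem.Str.join "" (pvRunB m f (rs.filter (fun s => !PySem.Set.contains seen (pvUrlOf s)))) := by
  induction rs with
  | nil => intro seen acc; rw [List.filter_nil, List.foldl_nil, pvRunB, pv_join_nil, String.append_empty]
  | cons s rest ih =>
    intro seen acc
    have e : PySem.Dict.getD (PySem.Dict.mk s) "url" "" = pvUrlOf s := rfl
    simp only [List.foldl_cons, List.filter_cons]
    by_cases h : pvUrlOf s ∈ seen
    · have hc : PySem.Set.contains seen (pvUrlOf s) = true := by
        simpa [PySem.Set.contains] using h
      have hA : pvStepA m f (seen, acc) s = (seen, acc) := by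
        simp only [pvStepA, e, hc, if_true]
      rw [hA, hc]
      simp only [Bool.not_true, Bool.false_eq_true, if_false]
      exact ih seen acc
    · have hc : PySem.Set.contains seen (pvUrlOf s) = false := by
        simpa [PySem.Set.contains] using h
      have hA : pvStepA m f (seen, acc) s
          = (PySem.Set.add seen (pvUrlOf s), acc ++ pvBlockB m f s) := by
        simp only [pvStepA, pvBlockB, e, hc, Bool.false_eq_true, if_false]
        cases f <;>
          (refine Prod.ext rfl ?_; apply String.toList_inj.mp; simp [pvUrlOf, String.append_assoc])
      rw [hA, hc]
      simp only [Bool.not_false, ite_true]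
      have hfil : (rest.filter (fun t => !PySem.Set.contains (PySem.Set.add seen (pvUrlOf s)) (pvUrlOf t)))
          = (rest.filter (fun t => !PySem.Set.contains seen (pvUrlOf t))).filter
              (fun t => pvUrlOf t ≠ pvUrlOf s) := by
        rw [List.filter_filter]
        apply List.filter_congr
        intro t _
        by_cases ht : pvUrlOf t = pvUrlOf s
        · simp [PySem.Set.contains, PySem.Set.mem_add, ht]
        · simp [PySem.Set.contains, PySem.Set.mem_add, ht]
      rw [ih (PySem.Set.add seen (pvUrlOf s)) (acc ++ pvBlockB m f s), hfil]
      rw [pvRunB, pv_join_cons]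
      apply String.toList_inj.mp
      simp [String.append_assoc]

theorem pv_filter_empty (rs : List (List (String × String))) :
    rs.filter (fun s => !PySem.Set.contains PySem.Set.empty (pvUrlOf s)) = rs := by
  apply List.filter_eq_self.mpr
  intro t _
  simp [PySem.Set.contains, PySem.Set.empty]

-- ===== VERDICT =====
theorem deduplicate_and_format_sources_py_spec : Claim_equal_deduplicate_and_format_sources_py := by
  intro sr m f _
  unfold Spec_deduplicate_and_format_sources_py
  unfold deduplicate_and_format_sources_py deduplicate_and_format_sources_py_alt
  simp only []
  rw [pv_foldA, pv_filter_empty]
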